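-- pv_equiv track=rewrite | github.com/hmx222/JScanner2 | AI/Get_Sen_Info.py | split_code_into_slices
-- ===== SOURCE A (Python) =====
-- def split_code_into_slices(code_str, lines_per_slice=20):
--     valid_lines = [line.rstrip() for line in code_str.splitlines() if line.strip()]
--     total_lines = len(valid_lines)
--     slices = []
--     for start_idx in range(0, total_lines, lines_per_slice):
--         end_idx = min(start_idx + lines_per_slice - 1, total_lines - 1)
--         slice_lines = valid_lines[start_idx:end_idx + 1]
--         formatted_slice = [f"{start_idx + 1 + idx}: {line}" for idx, line in enumerate(slice_lines)]
--         slices.append("\n".join(formatted_slice))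
--     return slices
-- ===== SOURCE B (Python) =====
-- def split_code_into_slices(code_str, lines_per_slice=20):
--     if lines_per_slice <= 0:
--         return []
--     slices = []
--     buf = []
--     n = 0
--     for raw in code_str.splitlines():
--         if raw.strip():
--             n += 1
--             buf.append(f"{n}: {raw.rstrip()}")
--             if len(buf) == lines_per_slice:
--                 slices.append("\n".join(buf))
--                 buf = []
--     if buf:
--         slices.append("\n".join(buf))
--     return slices
-- ===== Notes on version B (the rewrite author's own statement) =====
-- stated objective: alternative
-- what changed: B replaces A's partition-then-renumber scheme (range stepping with start_idx/end_idx/min arithmetic and per-chunk local re-numbering) by a single streaming pass that keeps a chunk buffer and a running line counter, emitting a slice whenever the buffer fills and flushing the remainder.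
import Mathlib
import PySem

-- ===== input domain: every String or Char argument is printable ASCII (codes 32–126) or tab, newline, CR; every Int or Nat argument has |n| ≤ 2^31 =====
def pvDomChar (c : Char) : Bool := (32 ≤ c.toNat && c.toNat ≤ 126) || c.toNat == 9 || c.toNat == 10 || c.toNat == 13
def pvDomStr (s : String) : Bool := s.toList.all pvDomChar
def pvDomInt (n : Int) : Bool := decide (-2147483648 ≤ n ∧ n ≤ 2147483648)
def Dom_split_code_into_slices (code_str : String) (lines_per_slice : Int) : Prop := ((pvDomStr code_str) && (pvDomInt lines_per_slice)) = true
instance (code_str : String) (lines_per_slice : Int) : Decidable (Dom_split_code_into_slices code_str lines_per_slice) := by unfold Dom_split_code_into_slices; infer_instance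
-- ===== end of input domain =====

-- B replaces A's partition-then-renumber index arithmetic by a single streaming pass with a
-- chunk buffer and a line counter (objective: alternative decomposition, same cost).

-- ===== PORT A =====
-- valid_lines = [line.rstrip() for line in code_str.splitlines() if line.strip()]
def pvValidLines (code_str : String) : List String :=
  ((PySem.Str.splitlines code_str).filter (fun line => PySem.Str.strip line != "")).map
    (fun line => PySem.Str.rstrip line)

def split_code_into_slices (code_str : String) (lines_per_slice : Int) : List String :=
  -- for start_idx in range(0, total_lines, lines_per_slice): …
  (PySem.List.pyRange 0 ((pvValidLines code_str).length : Int) lines_per_slice).map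
    (fun start_idx =>
      -- end_idx = min(start_idx + lines_per_slice - 1, total_lines - 1)
      -- slice_lines = valid_lines[start_idx:end_idx + 1]
      -- "\n".join([f"{start_idx + 1 + idx}: {line}" for idx, line in enumerate(slice_lines)])
      PySem.Str.join "\n"
        ((PySem.List.enumerate
            (PySem.List.slice (pvValidLines code_str) (some start_idx)
              (some (min (start_idx + lines_per_slice - 1)
                         (((pvValidLines code_str).length : Int) - 1) + 1))) 0).map
          (fun p => PySem.Int.toStr (start_idx + 1 + p.1) ++ ": " ++ p.2)))

-- ===== PORT B =====
-- loop body: n += 1; buf.append(f"{n}: {raw.rstrip()}"); flush buf when len(buf) == lines_per_slice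
def pvStep (k : Int) (st : List String × List String × Int) (line : String) :
    List String × List String × Int :=
  let n' := st.2.2 + 1
  let buf' := st.2.1 ++ [PySem.Int.toStr n' ++ ": " ++ line]
  if ((buf'.length : Int) == k) then (st.1 ++ [PySem.Str.join "\n" buf'], [], n')
  else (st.1, buf', n')

def split_code_into_slices_alt (code_str : String) (lines_per_slice : Int) : List String :=
  if lines_per_slice ≤ 0 then []
  else
    -- for raw in code_str.splitlines(): if raw.strip(): <pvStep>
    let st := (PySem.Str.splitlines code_str).foldl
      (fun (st : List String × List String × Int) raw =>
        if PySem.Str.strip raw != "" then pvStep lines_per_slice st (PySem.Str.rstrip raw)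
        else st) ([], [], 0)
    -- if buf: slices.append("\n".join(buf))
    if st.2.1 ≠ [] then st.1 ++ [PySem.Str.join "\n" st.2.1] else st.1

-- ===== PRECONDITION & SPEC =====
-- Pre_ excludes only lines_per_slice = 0, on which A raises ValueError (range() step 0).
def Pre_split_code_into_slices (code_str : String) (lines_per_slice : Int) : Prop :=
  lines_per_slice ≠ 0
instance (code_str : String) (lines_per_slice : Int) : Decidable (Pre_split_code_into_slices code_str lines_per_slice) := by unfold Pre_split_code_into_slices; infer_instance

def pvWitness_split_code_into_slices : String × Int := ("a\nb", 1)

def Spec_split_code_into_slices (code_str : String) (lines_per_slice : Int) (out : List String) : Prop := out = split_code_into_slices_alt code_str lines_per_slice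
instance (code_str : String) (lines_per_slice : Int) (out : List String) : Decidable (Spec_split_code_into_slices code_str lines_per_slice out) := by unfold Spec_split_code_into_slices; infer_instance

-- ===== CLAIM (what is proved, stated in full; the proofs are below) =====
def Claim_equal_split_code_into_slices : Prop := ∀ (code_str : String) (lines_per_slice : Int), Dom_split_code_into_slices code_str lines_per_slice → Pre_split_code_into_slices code_str lines_per_slice → Spec_split_code_into_slices code_str lines_per_slice (split_code_into_slices code_str lines_per_slice)


-- ===== LEMMAS AND PROOFS =====

-- the globally numbered kept lines, numbering starting at n+1
def pvNum (n : Int) (c : List String) : List String :=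
  (PySem.List.enumerate c n).map (fun p => PySem.Int.toStr (p.1 + 1) ++ ": " ++ p.2)

theorem pvNum_nil (n : Int) : pvNum n [] = [] := by
  simp [pvNum, PySem.List.enumerate_nil]

theorem pvNum_cons (n : Int) (x : String) (c : List String) :
    pvNum n (x :: c) = (PySem.Int.toStr (n + 1) ++ ": " ++ x) :: pvNum (n + 1) c := by
  simp [pvNum, PySem.List.enumerate_cons]

-- reference chunker: accumulate into buf, emit when buf reaches k lines, flush the rest
def pvFinChunks (k : Nat) : List String → List String → List String
  | buf, [] => if buf = [] then [] else [PySem.Str.join "\n" buf]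
  | buf, x :: xs =>
      if (buf ++ [x]).length = k then PySem.Str.join "\n" (buf ++ [x]) :: pvFinChunks k [] xs
      else pvFinChunks k (buf ++ [x]) xs

theorem pvFinChunks_spec (k : Nat) (l : List String) : ∀ buf : List String, buf.length < k →
    pvFinChunks k buf l =
      if buf ++ l = [] then []
      else if (buf ++ l).length ≤ k then [PySem.Str.join "\n" (buf ++ l)]
      else PySem.Str.join "\n" ((buf ++ l).take k) :: pvFinChunks k [] ((buf ++ l).drop k) := by
  induction l with
  | nil =>
      intro buf hb
      by_cases h : buf = []
      · simp [pvFinChunks, h]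
      · simp only [List.append_nil]
        rw [if_neg h, if_pos (le_of_lt hb)]
        simp [pvFinChunks, h]
  | cons x xs ih =>
      intro buf hb
      by_cases hc : (buf ++ [x]).length = k
      · simp only [pvFinChunks, if_pos hc]
        rcases xs with _ | ⟨y, ys⟩
        · have hne : buf ++ [x] ≠ [] := by simp
          rw [if_neg hne, if_pos (le_of_eq hc)]
          simp [pvFinChunks]
        · have hne : buf ++ x :: y :: ys ≠ [] := by simp
          rw [if_neg hne]
          have hlen : ¬ (buf ++ x :: y :: ys).length ≤ k := by
            have h1 : (buf ++ [x]).length = k := hc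
            simp only [List.length_append, List.length_cons, List.length_nil] at h1 ⊢
            omega
          rw [if_neg hlen]
          rw [show buf ++ x :: y :: ys = (buf ++ [x]) ++ (y :: ys) by simp]
          rw [List.take_left' hc, List.drop_left' hc]
      · simp only [pvFinChunks, if_neg hc]
        have hb' : (buf ++ [x]).length < k := by
          simp only [List.length_append, List.length_singleton] at *
          omega
        rw [ih (buf ++ [x]) hb']
        rw [show (buf ++ [x]) ++ xs = buf ++ x :: xs by simp]

theorem pv_pyRange_neg_nil (n : Nat) (k : Int) (hk : k < 0) :
    PySem.List.pyRange 0 (n : Int) k = [] := by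
  unfold PySem.List.pyRange
  rw [if_neg (by omega : ¬ k = 0)]
  simp only [show ¬ (0:Int) < k by omega, if_false, show ¬ (n:Int) < 0 by omega]
  simp

theorem pv_pyRange_pos_cons (n k : Int) (hk : 0 < k) (hn : 0 < n) :
    PySem.List.pyRange 0 n k = 0 :: (PySem.List.pyRange 0 (n - k) k).map (· + k) := by
  rw [PySem.List.pyRange_of_pos _ _ hk, PySem.List.pyRange_of_pos _ _ hk]
  rw [if_pos (by omega : (0:Int) < n)]
  by_cases h : (0:Int) < n - k
  · rw [if_pos h]
    have h2 : n - 0 + k - 1 = (n - k - 0 + k - 1) + 1 * k := by ring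
    rw [h2, Int.add_mul_ediv_right _ _ (by omega : k ≠ 0)]
    have h3 : 0 ≤ (n - k - 0 + k - 1) / k := Int.ediv_nonneg (by omega) (by omega)
    rw [show ((n - k - 0 + k - 1) / k + 1).toNat = ((n - k - 0 + k - 1) / k).toNat + 1 by omega]
    rw [List.range_succ_eq_map]
    simp only [List.map_cons, List.map_map, Nat.cast_zero, mul_zero, add_zero]
    congr 1
    apply List.map_congr_left
    intro a _
    simp only [Function.comp_apply]
    push_cast
    ring
  · rw [if_neg h]
    have hq : (n - 0 + k - 1) / k = 1 := by
      have h1 : 1 ≤ (n - 0 + k - 1) / k := by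
        rw [Int.le_ediv_iff_mul_le hk]; omega
      have h2 : (n - 0 + k - 1) / k < 2 := by
        rw [Int.ediv_lt_iff_lt_mul hk]; omega
      omega
    rw [hq]
    simp

theorem pvChunks_eq (k : Int) (hk : 1 ≤ k) : ∀ (N : Nat) (l : List String), l.length ≤ N →
    (PySem.List.pyRange 0 (l.length : Int) k).map
        (fun i => PySem.Str.join "\n" (PySem.List.slice l (some i) (some (i + k))))
      = pvFinChunks k.toNat [] l := by
  intro N
  induction N with
  | zero =>
      intro l hl
      have h0 : l = [] := List.eq_nil_of_length_eq_zero (by omega)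
      subst h0
      rw [show ((List.length ([] : List String) : Int)) = 0 by simp]
      rw [PySem.List.pyRange_of_pos _ _ (by omega : (0:Int) < k), if_neg (by omega)]
      simp [pvFinChunks]
  | succ N ih =>
      intro l hl
      by_cases hl0 : l = []
      · subst hl0
        rw [show ((List.length ([] : List String) : Int)) = 0 by simp]
        rw [PySem.List.pyRange_of_pos _ _ (by omega : (0:Int) < k), if_neg (by omega)]
        simp [pvFinChunks]
      · have hL : 0 < l.length := List.length_pos_iff.mpr hl0
        have hkN : (k.toNat : Int) = k := Int.toNat_of_nonneg (by omega)
        rw [pv_pyRange_pos_cons _ _ (by omega) (by exact_mod_cast hL)]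
        rw [List.map_cons, List.map_map]
        rw [pvFinChunks_spec k.toNat l [] (by simp only [List.length_nil]; omega)]
        simp only [List.nil_append]
        rw [if_neg hl0]
        by_cases hbig : l.length ≤ k.toNat
        · rw [if_pos hbig]
          have htl : PySem.List.pyRange 0 ((l.length : Int) - k) k = [] := by
            rw [PySem.List.pyRange_of_pos _ _ (by omega : (0:Int) < k), if_neg (by omega)]
            simp
          rw [htl]
          simp only [List.map_nil]
          congr 1
          rw [PySem.List.slice_toNat _ (by omega) (by omega)]
          simp only [Int.toNat_zero, List.drop_zero, Nat.sub_zero, zero_add]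
          rw [List.take_of_length_le hbig]
        · rw [if_neg hbig]
          have hkl : k.toNat ≤ l.length := by omega
          have hdl : (((l.drop k.toNat).length : Nat) : Int) = (l.length : Int) - k := by
            simp only [List.length_drop]
            omega
          have htail : (PySem.List.pyRange 0 ((l.length : Int) - k) k).map
                ((fun i => PySem.Str.join "\n" (PySem.List.slice l (some i) (some (i + k)))) ∘ (· + k))
              = (PySem.List.pyRange 0 (((l.drop k.toNat).length : Nat) : Int) k).map
                  (fun i => PySem.Str.join "\n" (PySem.List.slice (l.drop k.toNat) (some i) (some (i + k)))) := by
            rw [hdl]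
            apply List.map_congr_left
            intro i hi
            obtain ⟨hi0, -, -⟩ := (PySem.List.mem_pyRange_iff_of_pos (by omega) i).1 hi
            simp only [Function.comp_apply]
            congr 1
            rw [PySem.List.slice_toNat _ (by omega) (by omega),
                PySem.List.slice_toNat _ (by omega) (by omega), List.drop_drop]
            congr 1
            · omega
            · congr 1
              omega
          rw [htail, ih (l.drop k.toNat) (by simp only [List.length_drop]; omega)]
          congr 1
          rw [PySem.List.slice_toNat _ (by omega) (by omega)]
          simp only [Int.toNat_zero, List.drop_zero, Nat.sub_zero, zero_add]

-- A = chunks of the global numbered list (positive step)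
theorem pv_enum_shift {α : Type} (c : List α) (s t : Int) :
    PySem.List.enumerate c (s + t) = (PySem.List.enumerate c t).map (fun p => (s + p.1, p.2)) := by
  induction c generalizing t with
  | nil => simp [PySem.List.enumerate_nil]
  | cons x xs ih =>
      simp only [PySem.List.enumerate_cons, List.map_cons]
      rw [show s + t + 1 = s + (t + 1) by ring, ih]

theorem pv_enum_drop {α : Type} (c : List α) (m : Nat) (s : Int) :
    PySem.List.enumerate (c.drop m) (s + m) = (PySem.List.enumerate c s).drop m := by
  induction c generalizing m s with
  | nil => simp [PySem.List.enumerate_nil]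
  | cons x xs ih =>
      cases m with
      | zero => simp
      | succ m' =>
          simp only [List.drop_succ_cons, PySem.List.enumerate_cons]
          rw [show s + (m' + 1 : Nat) = (s + 1) + (m' : Int) by push_cast; ring, ih]

theorem pv_enum_take {α : Type} (c : List α) (m : Nat) (s : Int) :
    PySem.List.enumerate (c.take m) s = (PySem.List.enumerate c s).take m := by
  induction c generalizing m s with
  | nil => simp [PySem.List.enumerate_nil]
  | cons x xs ih =>
      cases m with
      | zero => simp [PySem.List.enumerate_nil]
      | succ m' => simp only [List.take_succ_cons, PySem.List.enumerate_cons, ih]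

theorem pv_slice_map {α β : Type} (f : α → β) (l : List α) (a b : Int)
    (ha : 0 ≤ a) (hb : 0 ≤ b) :
    PySem.List.slice (l.map f) (some a) (some b) = (PySem.List.slice l (some a) (some b)).map f := by
  rw [PySem.List.slice_toNat _ ha hb, PySem.List.slice_toNat _ ha hb, ← List.map_drop, ← List.map_take]

theorem pvA_chunks (cs : String) (k : Int) (hpos : 0 < k) :
    split_code_into_slices cs k
      = (PySem.List.pyRange 0 ((pvNum 0 (pvValidLines cs)).length : Int) k).map
          (fun i => PySem.Str.join "\n" (PySem.List.slice (pvNum 0 (pvValidLines cs)) (some i) (some (i + k)))) := by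
  unfold split_code_into_slices pvNum
  set valid := pvValidLines cs with hv
  rw [List.length_map, PySem.List.length_enumerate]
  apply List.map_congr_left
  intro s hs
  obtain ⟨hs0, hsn, -⟩ := (PySem.List.mem_pyRange_iff_of_pos hpos s).1 hs
  have hsk : (0:Int) ≤ s + k := by omega
  have he : (0:Int) ≤ min (s + k - 1) ((valid.length : Int) - 1) + 1 := by omega
  rw [pv_slice_map _ _ _ _ hs0 hsk,
      PySem.List.slice_toNat _ hs0 hsk,
      PySem.List.slice_toNat _ hs0 he,
      show (PySem.List.enumerate valid 0).drop s.toNat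
          = PySem.List.enumerate (valid.drop s.toNat) ((0:Int) + (s.toNat : Int)) from
        (pv_enum_drop valid s.toNat 0).symm,
      ← pv_enum_take]
  congr 1
  have htake : (valid.drop s.toNat).take
        ((min (s + k - 1) ((valid.length : Int) - 1) + 1).toNat - s.toNat)
      = (valid.drop s.toNat).take ((s + k).toNat - s.toNat) := by
    rw [List.take_eq_take_iff]
    simp only [List.length_drop]
    omega
  rw [htake]
  set c := (valid.drop s.toNat).take ((s + k).toNat - s.toNat)
  rw [show (0:Int) + (s.toNat : Int) = s + 0 by omega, pv_enum_shift, List.map_map]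
  apply List.map_congr_left
  intro p _
  simp only [Function.comp]
  rw [show s + 1 + p.1 = s + p.1 + 1 by ring]

-- B = the same chunks, by the loop invariant
theorem pv_fuse {β : Type} (p : String → Bool) (g : β → String → β) (ls : List String) (init : β) :
    ls.foldl (fun st raw => if p raw then g st (PySem.Str.rstrip raw) else st) init
      = ((ls.filter p).map (fun line => PySem.Str.rstrip line)).foldl g init := by
  rw [List.foldl_map, PySem.List.foldl_if_eq_foldl_filter]

theorem pv_inv (k : Int) (hk : 1 ≤ k) (c : List String) :
    ∀ (slices buf : List String) (n : Int), buf.length < k.toNat →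
    (if (c.foldl (pvStep k) (slices, buf, n)).2.1 ≠ [] then
        (c.foldl (pvStep k) (slices, buf, n)).1 ++
          [PySem.Str.join "\n" (c.foldl (pvStep k) (slices, buf, n)).2.1]
      else (c.foldl (pvStep k) (slices, buf, n)).1)
      = slices ++ pvFinChunks k.toNat buf (pvNum n c) := by
  induction c with
  | nil =>
      intro slices buf n _
      rw [pvNum_nil]
      by_cases hb0 : buf = [] <;> simp [pvFinChunks, hb0]
  | cons x xs ih =>
      intro slices buf n hb
      have hkN : (k.toNat : Int) = k := Int.toNat_of_nonneg (by omega)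
      simp only [List.foldl_cons]
      rw [pvNum_cons]
      by_cases hc : (buf ++ [PySem.Int.toStr (n + 1) ++ ": " ++ x]).length = k.toNat
      · have hstep : pvStep k (slices, buf, n) x
            = (slices ++ [PySem.Str.join "\n" (buf ++ [PySem.Int.toStr (n + 1) ++ ": " ++ x])], [], n + 1) := by
          unfold pvStep
          dsimp only
          rw [if_pos (by simp only [beq_iff_eq]; omega)]
        rw [hstep, ih _ _ _ (by simp only [List.length_nil]; omega)]
        simp only [pvFinChunks, if_pos hc]
        simp
      · have hstep : pvStep k (slices, buf, n) x
            = (slices, buf ++ [PySem.Int.toStr (n + 1) ++ ": " ++ x], n + 1) := by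
          unfold pvStep
          dsimp only
          rw [if_neg (by simp only [beq_iff_eq]; omega)]
        have hb' : (buf ++ [PySem.Int.toStr (n + 1) ++ ": " ++ x]).length < k.toNat := by
          simp only [List.length_append, List.length_singleton] at *
          omega
        rw [hstep, ih _ _ _ hb']
        simp only [pvFinChunks, if_neg hc]

theorem pvB_eq (cs : String) (k : Int) (hk : 1 ≤ k) :
    split_code_into_slices_alt cs k = pvFinChunks k.toNat [] (pvNum 0 (pvValidLines cs)) := by
  unfold split_code_into_slices_alt
  rw [if_neg (by omega : ¬ k ≤ 0)]
  show (if ((PySem.Str.splitlines cs).foldl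
        (fun st raw => if PySem.Str.strip raw != "" then pvStep k st (PySem.Str.rstrip raw) else st)
        ([], [], 0)).2.1 ≠ [] then _ else _) = _
  rw [pv_fuse (fun line => PySem.Str.strip line != "") (pvStep k)]
  have h := pv_inv k hk (pvValidLines cs) [] [] 0 (by simp only [List.length_nil]; omega)
  simp only [List.nil_append] at h
  exact h

-- ===== VERDICT (by name: the statement is the Claim_ definition above) =====
theorem split_code_into_slices_spec : Claim_equal_split_code_into_slices := by
  intro cs k _ hk
  unfold Pre_split_code_into_slices at hk
  unfold Spec_split_code_into_slices
  rcases (by omega : k < 0 ∨ 1 ≤ k) with hneg | hpos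
  · unfold split_code_into_slices split_code_into_slices_alt
    rw [pv_pyRange_neg_nil _ _ hneg, if_pos (by omega : k ≤ 0)]
    simp
  · rw [pvA_chunks cs k (by omega),
        pvChunks_eq k hpos (pvNum 0 (pvValidLines cs)).length _ (le_refl _),
        ← pvB_eq cs k hpos]
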